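-- pv_equiv track=rewrite | github.com/nikantgr/TYT-TM-D70W-ICF-Tool | icf_tool.py | decode_signaling_id
-- ===== SOURCE A (Python) =====
-- def decode_signaling_id(data, length):
--     # Signaling IDs are often stored as nibbles but we'll use hex chars for simplicity
--     # A=A, B=B, C=C, D=D, E=*, F=# as per the programmer logic
--     res = ""
--     for i in range(length):
--         byte_idx = i // 2
--         nibble_idx = i % 2
--         if byte_idx >= len(data): break
--         b = data[byte_idx]
--         nib = (b >> 4) if nibble_idx == 0 else (b & 0xF)
--         if nib <= 9: res += str(nib)
--         elif nib == 0xA: res += 'A'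
--         elif nib == 0xB: res += 'B'
--         elif nib == 0xC: res += 'C'
--         elif nib == 0xD: res += 'D'
--         elif nib == 0xE: res += '*'
--         elif nib == 0xF: res += '#'
--     return res.rstrip('#').rstrip('*').rstrip('0') # Rough cleanup
-- ===== SOURCE B (Python) =====
-- def decode_signaling_id(data, length):
--     # Render the whole buffer as a hex string, keep the first `length` digits,
--     # swap the two dial symbols in, and strip the trailing filler.
--     digits = ''.join(format(b, '02X') for b in data)[:max(length, 0)]
--     return digits.translate(str.maketrans('EF', '*#')).rstrip('#').rstrip('*').rstrip('0')
-- ===== Notes on version B (the rewrite author's own statement) =====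
-- stated objective: simpler
-- what changed: B renders the whole buffer as a hex string with format(b,'02X'), slices off the first `length` digits and swaps E/F for */# with str.translate, replacing A's per-index loop with //2 and %2 arithmetic, a break and an eight-branch elif chain; Pre_ requires the entries the decoder actually consumes (the first ceil(length/2)) to be byte values 0..255, the decoder's natural domain, excluding non-byte entries on which A's output (decimal text for negative nibbles, silently dropped high nibbles above 15) is an implementation artefact.
-- outside the precondition, e.g. on decode_signaling_id([-1], 1): A returns '-1', B returns '-'; on decode_signaling_id([300], 2): A returns 'C', B returns '12'
import Mathlib
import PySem

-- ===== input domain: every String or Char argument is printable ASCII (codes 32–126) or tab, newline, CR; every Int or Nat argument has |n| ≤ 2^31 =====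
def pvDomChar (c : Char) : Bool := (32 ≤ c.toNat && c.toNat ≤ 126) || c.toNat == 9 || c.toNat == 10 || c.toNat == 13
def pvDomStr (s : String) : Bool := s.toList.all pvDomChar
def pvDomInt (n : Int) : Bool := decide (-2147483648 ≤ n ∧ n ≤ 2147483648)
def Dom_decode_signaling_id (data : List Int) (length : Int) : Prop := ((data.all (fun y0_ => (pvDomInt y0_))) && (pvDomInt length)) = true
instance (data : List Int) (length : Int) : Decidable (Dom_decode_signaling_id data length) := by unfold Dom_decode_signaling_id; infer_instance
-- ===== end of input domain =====

-- B renders the buffer as a hex string (format '02X'), slices it to `length` digits and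
-- swaps E/F for */# with a character translation, instead of A's per-index nibble loop
-- with an eight-branch elif chain (objective: simpler).

-- Python's s.rstrip(c) for a single char c — exact: drops trailing copies of c.
def rstripCh (cs : List Char) (c : Char) : List Char :=
  ((cs.reverse.dropWhile (fun x => x = c)).reverse)

-- ===== PORT A =====
-- the elif chain of A, extracted as a helper (same branches, same order)
def chrA (nib : Int) : List Char :=
  if nib ≤ 9 then PySem.Int.toChars nib
  else if nib = 0xA then ['A']
  else if nib = 0xB then ['B']
  else if nib = 0xC then ['C']
  else if nib = 0xD then ['D']
  else if nib = 0xE then ['*']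
  else if nib = 0xF then ['#']
  else []

-- the 'for i in range(length)' loop with its break; fuel = number of remaining iterations
-- (byte_idx = i // 2, nibble_idx = i %% 2, b = data[byte_idx] — in range under the guard)
def loopA (data : List Int) (fuel : Nat) (i : Int) (res : List Char) : List Char :=
  match fuel with
  | 0 => res
  | fuel + 1 =>
    if (data.length : Int) ≤ PySem.Int.floordiv i 2 then res
    else
      loopA data fuel (i + 1)
        (res ++ chrA (if PySem.Int.mod i 2 = 0
            then (PySem.List.pyGetD data (PySem.Int.floordiv i 2) 0) >>> (4 : Nat)
            else PySem.Int.band (PySem.List.pyGetD data (PySem.Int.floordiv i 2) 0) 0xF))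

def decode_signaling_id (data : List Int) (length : Int) : String :=
  String.ofList (rstripCh (rstripCh (rstripCh (loopA data length.toNat 0 []) '#') '*') '0')

-- ===== PORT B =====
-- format(n, 'X') digit production for a natural number, fuel-structured; exact: uppercase
-- hex digits, most significant first.
def hexCore (fuel n : Nat) (acc : List Char) : List Char :=
  match fuel with
  | 0 => acc
  | fuel + 1 =>
    let d := "0123456789ABCDEF".toList.getD (n % 16) '0'
    if n < 16 then d :: acc else hexCore fuel (n / 16) (d :: acc)

-- Python format(b, '02X'): hex digits, zero-padded to width 2, '0'-fill after the sign.
def format02X (b : Int) : List Char :=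
  if b < 0 then
    let ds := hexCore ((-b).toNat + 1) (-b).toNat []
    '-' :: (List.replicate (2 - 1 - ds.length) '0' ++ ds)
  else
    let ds := hexCore (b.toNat + 1) b.toNat []
    List.replicate (2 - ds.length) '0' ++ ds

-- str.maketrans('EF', '*#') applied per character
def trChar (c : Char) : Char := if c = 'E' then '*' else if c = 'F' then '#' else c

def decode_signaling_id_alt (data : List Int) (length : Int) : String :=
  String.ofList (rstripCh (rstripCh (rstripCh
    ((PySem.List.slice ((data.map format02X).flatten) none (some (max length 0))).map trChar)
    '#') '*') '0')

-- ===== PRECONDITION & SPEC =====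
-- Pre_ requires the bytes the decoder actually consumes (the first ⌈length/2⌉ entries) to be
-- byte values 0..255, the decoder's natural domain; on non-byte entries A still returns, but
-- its output (decimal text for negative nibbles, silently dropped high nibbles above 15) is
-- an implementation artefact nobody would specify.
def Pre_decode_signaling_id (data : List Int) (length : Int) : Prop :=
  ∀ b ∈ data.take ((length.toNat + 1) / 2), 0 ≤ b ∧ b < 256
instance (data : List Int) (length : Int) : Decidable (Pre_decode_signaling_id data length) := by
  unfold Pre_decode_signaling_id; infer_instance

def pvWitness_decode_signaling_id : List Int × Int := ([18, 175], 3)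

def Spec_decode_signaling_id (data : List Int) (length : Int) (out : String) : Prop := out = decode_signaling_id_alt data length
instance (data : List Int) (length : Int) (out : String) : Decidable (Spec_decode_signaling_id data length out) := by unfold Spec_decode_signaling_id; infer_instance

-- ===== CLAIM (what is proved, stated in full; the proofs are below) =====
def Claim_equal_decode_signaling_id : Prop := ∀ (data : List Int) (length : Int), Dom_decode_signaling_id data length → Pre_decode_signaling_id data length → Spec_decode_signaling_id data length (decode_signaling_id data length)

-- ===== LEMMAS AND PROOFS =====

-- the nibble stream A walks, as a list (proof-side view of A's loop)
def nibsOf (data : List Int) : List Int :=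
  data.flatMap (fun (b : Int) => [b >>> (4 : Nat), PySem.Int.band b 0xF])

lemma length_nibsOf (data : List Int) : (nibsOf data).length = 2 * data.length := by
  induction data with
  | nil => rfl
  | cons b rest ih => simp [nibsOf, List.flatMap_cons] at *; omega

lemma nibsOf_getElem? (data : List Int) (k : Nat) :
    (nibsOf data)[k]? =
      (data[k / 2]?).map (fun (b : Int) => if k % 2 = 0 then b >>> (4 : Nat) else PySem.Int.band b 0xF) := by
  induction data generalizing k with
  | nil => simp [nibsOf]
  | cons b rest ih =>
    match k with
    | 0 => simp [nibsOf, List.flatMap_cons]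
    | 1 => simp [nibsOf, List.flatMap_cons]
    | (k + 2) =>
      have h2 : (k + 2) / 2 = k / 2 + 1 := by omega
      have h3 : (k + 2) % 2 = k % 2 := by omega
      simpa [nibsOf, List.flatMap_cons, h2, h3] using ih k

lemma loopA_eq (data : List Int) :
    ∀ (fuel k : Nat) (res : List Char),
      loopA data fuel (k : Int) res =
        res ++ ((((nibsOf data).drop k).take fuel).map chrA).flatten := by
  intro fuel
  induction fuel with
  | zero => intro k res; simp [loopA]
  | succ fuel ih =>
    intro k res
    rw [loopA]
    have hfd : PySem.Int.floordiv (k : Int) 2 = ((k / 2 : Nat) : Int) := by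
      exact_mod_cast PySem.Int.floordiv_natCast k 2
    have hmd : PySem.Int.mod (k : Int) 2 = ((k % 2 : Nat) : Int) := by
      exact_mod_cast PySem.Int.mod_natCast k 2
    by_cases hstop : data.length ≤ k / 2
    · have hlen : (nibsOf data).length ≤ k := by
        have := length_nibsOf data; omega
      rw [if_pos (by rw [hfd]; exact_mod_cast hstop)]
      rw [List.drop_eq_nil_of_le hlen]
      simp
    · rw [if_neg (by rw [hfd]; intro h; exact hstop (by exact_mod_cast h))]
      have hk2 : k / 2 < data.length := by omega
      have hklt : k < (nibsOf data).length := by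
        have := length_nibsOf data; omega
      have hb : PySem.List.pyGetD data ((k / 2 : Nat) : Int) 0 = data[k / 2] := by
        rw [PySem.List.pyGetD_natCast]
        simp [List.getD, hk2]
      have hsome := nibsOf_getElem? data k
      rw [List.getElem?_eq_getElem hk2, Option.map_some, List.getElem?_eq_getElem hklt] at hsome
      have hval := Option.some.inj hsome
      have hnib :
          (if ((k % 2 : Nat) : Int) = 0 then data[k / 2] >>> (4 : Nat)
            else PySem.Int.band data[k / 2] 0xF)
            = (nibsOf data)[k]'hklt := by
        rw [hval]
        by_cases hp : k % 2 = 0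
        · simp [hp]
        · simp [hp]
          intro hdvd
          omega
      have hdrop : (nibsOf data).drop k = (nibsOf data)[k]'hklt :: (nibsOf data).drop (k + 1) :=
        List.drop_eq_getElem_cons hklt
      have hstep := ih (k + 1) (res ++ chrA ((nibsOf data)[k]'hklt))
      rw [hfd, hmd, hb, hnib]
      push_cast at hstep
      rw [hstep, hdrop, List.take_succ_cons, List.map_cons, List.flatten_cons, List.append_assoc]

-- per-byte key fact, decided once over all 256 bytes: the two translated hex digits of a
-- byte are exactly A's characters for its two nibbles, and each is a single character
set_option maxRecDepth 100000 in
lemma byteKey : ∀ n : Fin 256,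
    (format02X ((n : Nat) : Int)).map trChar
      = chrA (((n : Nat) : Int) >>> (4 : Nat)) ++ chrA (PySem.Int.band ((n : Nat) : Int) 0xF)
    ∧ (chrA (((n : Nat) : Int) >>> (4 : Nat))).length = 1
    ∧ (chrA (PySem.Int.band ((n : Nat) : Int) 0xF)).length = 1 := by decide

lemma flatten_take_of_len1 {α : Type} (l : List (List α)) (h : ∀ x ∈ l, x.length = 1) (k : Nat) :
    (l.take k).flatten = l.flatten.take k := by
  induction l generalizing k with
  | nil => simp
  | cons x xs ih =>
    obtain ⟨a, rfl⟩ := List.length_eq_one_iff.mp (h x (by simp))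
    cases k with
    | zero => simp
    | succ k =>
      simp only [List.take_succ_cons, List.flatten_cons, List.singleton_append,
        List.take_succ_cons]
      rw [ih (fun x hx => h x (by simp [hx])) k]

lemma nibsOf_cons (b : Int) (rest : List Int) :
    nibsOf (b :: rest) = (b >>> (4 : Nat)) :: PySem.Int.band b 0xF :: nibsOf rest := by
  simp [nibsOf, List.flatMap_cons]

lemma streams (data : List Int) (h : ∀ b ∈ data, 0 ≤ b ∧ b < 256) :
    ((data.map format02X).flatten).map trChar = ((nibsOf data).map chrA).flatten
    ∧ ∀ c ∈ (nibsOf data).map chrA, c.length = 1 := by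
  induction data with
  | nil => simp [nibsOf]
  | cons b rest ih =>
    obtain ⟨hb0, hb1⟩ := h b (by simp)
    have hn : b = (((b.toNat : Nat) : Int)) := by omega
    have hk := byteKey ⟨b.toNat, by omega⟩
    rw [← hn] at hk
    obtain ⟨hmap, hl1, hl2⟩ := hk
    obtain ⟨ih1, ih2⟩ := ih (fun x hx => h x (by simp [hx]))
    constructor
    · simp only [List.map_cons, List.flatten_cons, List.map_append, hmap, ih1,
        nibsOf_cons, List.append_assoc]
    · intro c hc
      rw [nibsOf_cons] at hc
      simp only [List.map_cons, List.mem_cons] at hc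
      rcases hc with rfl | rfl | hc
      · exact hl1
      · exact hl2
      · exact ih2 c hc

lemma nibsOf_take (data : List Int) (m : Nat) :
    nibsOf (data.take m) = (nibsOf data).take (2 * m) := by
  induction data generalizing m with
  | nil => simp [nibsOf]
  | cons b rest ih =>
    cases m with
    | zero => simp [nibsOf]
    | succ m =>
      have h2 : 2 * (m + 1) = (2 * m + 1) + 1 := by ring
      simp [List.take_succ_cons, nibsOf_cons, h2, ih]

lemma hexflat_len (d : List Int) (h : ∀ b ∈ d, 0 ≤ b ∧ b < 256) :
    ((d.map format02X).flatten).length = 2 * d.length := by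
  induction d with
  | nil => simp
  | cons b rest ih =>
    obtain ⟨hb0, hb1⟩ := h b (by simp)
    have hn : b = (((b.toNat : Nat) : Int)) := by omega
    have hk := byteKey ⟨b.toNat, by omega⟩
    rw [← hn] at hk
    obtain ⟨hmap, hl1, hl2⟩ := hk
    have hfb : (format02X b).length = 2 := by
      have := congrArg List.length hmap
      simpa [hl1, hl2] using this
    simp only [List.map_cons, List.flatten_cons, List.length_append, hfb,
      ih (fun x hx => h x (by simp [hx])), List.length_cons]
    ring

-- the whole-prefix equality: under bytes, A's decoded characters are B's translated hex slice
lemma core (d : List Int) (k : Nat) (h : ∀ b ∈ d, 0 ≤ b ∧ b < 256) :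
    (((nibsOf d).take k).map chrA).flatten
      = List.map trChar (List.take k ((d.map format02X).flatten)) := by
  obtain ⟨h1, h2⟩ := streams d h
  rw [List.map_take, List.map_take, h1, ← flatten_take_of_len1 _ h2]

-- ===== VERDICT (by name: the statement is the Claim_ definition above) =====
theorem decode_signaling_id_spec : Claim_equal_decode_signaling_id := by
  intro data length _ hpre
  unfold Pre_decode_signaling_id at hpre
  unfold Spec_decode_signaling_id decode_signaling_id decode_signaling_id_alt
  have hmax : max length 0 = ((length.toNat : Nat) : Int) := (Int.ofNat_toNat length).symm
  rw [hmax, PySem.List.slice_to_natCast]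
  have h0 : (0 : Int) = ((0 : Nat) : Int) := rfl
  rw [h0, loopA_eq data length.toNat 0 [], List.nil_append, List.drop_zero]
  have eA : (nibsOf (data.take ((length.toNat + 1) / 2))).take length.toNat
      = (nibsOf data).take length.toNat := by
    rw [nibsOf_take, List.take_take, Nat.min_eq_left (by omega)]
  have eB : List.take length.toNat ((data.map format02X).flatten)
      = List.take length.toNat (((data.take ((length.toNat + 1) / 2)).map format02X).flatten) := by
    conv_lhs => rw [← List.take_append_drop ((length.toNat + 1) / 2) data]
    rw [List.map_append, List.flatten_append]
    by_cases hlen : data.length ≤ (length.toNat + 1) / 2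
    · rw [List.drop_eq_nil_of_le hlen]; simp
    · rw [List.take_append_of_le_length]
      rw [hexflat_len _ hpre, List.length_take]
      omega
  rw [← eA, core _ length.toNat hpre, ← eB]
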